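-- pv_equiv track=rewrite | github.com/bh2980/Algorithm-Problem | 프로그래머스/lv2/87390. n＾2 배열 자르기/n＾2 배열 자르기.py | solution
-- ===== SOURCE A (Python) =====
-- def solution(n, left, right):
--     #모든 줄을 구하지 말고 구해야하는 줄만 구하기.
--     first = left // n + 1
--     last = right // n + 1
--
--     num_arr = []
--
--     for i in range(first, last+1):
--         for _ in range(i):
--             num_arr.append(i)
--
--         for j in range(i+1, n+1):
--             num_arr.append(j)
--
--     answer = num_arr[left % n : right - (left // n) * n +1]
--     return answer
-- ===== SOURCE B (Python) =====
-- def solution(n, left, right):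
--     # closed form: element at flat index k of the n*n array is max(k//n, k%n) + 1
--     return [max(k // n, k % n) + 1 for k in range(left, right + 1)]
-- ===== Notes on version B (the rewrite author's own statement) =====
-- stated objective: alternative
-- what changed: B computes each requested element directly by the closed form max(k//n, k%n)+1 in one pass over [left, right], instead of materialising whole rows first..last of the array and slicing the concatenation.
-- outside the precondition, e.g. on solution(3, -4, 2): A returns [2, 3, 1, 2, 3, 1, 2], B returns [3, 1, 2, 3, 1, 2, 3]; on solution(-2, 0, 1): A returns [], B returns [1, 0]
import Mathlib
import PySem

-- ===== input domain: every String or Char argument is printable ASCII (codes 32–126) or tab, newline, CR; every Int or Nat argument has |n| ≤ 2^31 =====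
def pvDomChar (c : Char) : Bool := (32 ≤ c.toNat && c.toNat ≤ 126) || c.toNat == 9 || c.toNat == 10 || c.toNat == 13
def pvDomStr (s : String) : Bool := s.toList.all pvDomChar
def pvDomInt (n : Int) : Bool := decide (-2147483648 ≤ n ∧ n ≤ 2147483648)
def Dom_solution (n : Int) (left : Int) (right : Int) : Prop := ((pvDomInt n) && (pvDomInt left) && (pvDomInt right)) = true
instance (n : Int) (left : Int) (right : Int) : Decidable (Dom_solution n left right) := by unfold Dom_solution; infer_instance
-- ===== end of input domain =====

-- B replaces A's row-materialise-then-slice construction by the closed form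
-- max(k//n, k%n)+1 evaluated once per requested flat index (objective: alternative).

-- ===== PORT A =====
-- literal transliteration of A: build rows first..last of the array, then slice.
def solution (n : Int) (left : Int) (right : Int) : List Int :=
  let first := PySem.Int.floordiv left n + 1
  let last := PySem.Int.floordiv right n + 1
  let num_arr : List Int :=
    (PySem.List.pyRange first (last + 1) 1).foldl (fun acc i =>
      let acc := (PySem.List.pyRange 0 i 1).foldl (fun a _ => a ++ [i]) acc
      (PySem.List.pyRange (i + 1) (n + 1) 1).foldl (fun a j => a ++ [j]) acc) []
  PySem.List.slice num_arr (some (PySem.Int.mod left n))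
    (some (right - PySem.Int.floordiv left n * n + 1))

-- ===== PORT B =====
-- literal transliteration of B: one comprehension over range(left, right+1).
def solution_alt (n : Int) (left : Int) (right : Int) : List Int :=
  (PySem.List.pyRange left (right + 1) 1).map
    (fun k => max (PySem.Int.floordiv k n) (PySem.Int.mod k n) + 1)

-- ===== PRECONDITION & SPEC =====
-- Pre_ is n ≥ 1 together with requests A answers from rows that exist in the n×n array
-- (any empty request right < left; a request starting at flat index left ≥ -n whose rows,
-- except possibly a partially-taken last one, lie inside the array). Outside it A raises
-- ZeroDivisionError (n = 0) or returns values that are artifacts of generating rows that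
-- do not exist in the n×n array (n < 0, or left < -n, or a request past row n).
def Pre_solution (n : Int) (left : Int) (right : Int) : Prop :=
  1 ≤ n ∧ (right < left ∨ (-n ≤ left ∧ (right < n * n + n ∨ PySem.Int.floordiv left n = PySem.Int.floordiv right n)))
instance (n : Int) (left : Int) (right : Int) : Decidable (Pre_solution n left right) := by
  unfold Pre_solution; infer_instance

def pvWitness_solution : Int × Int × Int := (3, 2, 5)

def Spec_solution (n : Int) (left : Int) (right : Int) (out : List Int) : Prop :=
  out = solution_alt n left right
instance (n : Int) (left : Int) (right : Int) (out : List Int) : Decidable (Spec_solution n left right out) := by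
  unfold Spec_solution; infer_instance

-- ===== CLAIM (what is proved, stated in full; the proofs are below) =====
def Claim_equal_solution : Prop := ∀ (n : Int) (left : Int) (right : Int), Dom_solution n left right → Pre_solution n left right → Spec_solution n left right (solution n left right)

-- ===== LEMMAS AND PROOFS =====

-- the closed-form element function shared by the proofs
def pvF (n k : Int) : Int := max (PySem.Int.floordiv k n) (PySem.Int.mod k n) + 1

-- the array cell at flat index q*n+j (row q, column j) is max(q,j)+1
theorem pvF_cell (n q j : Int) (hn : 0 < n) (hj0 : 0 ≤ j) (hjn : j < n) :
    pvF n (q * n + j) = max q j + 1 := by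
  unfold pvF
  have hfd : PySem.Int.floordiv (q * n + j) n = q := by
    rw [PySem.Int.floordiv_eq_iff_of_pos hn]; constructor <;> nlinarith
  have h := PySem.Int.floordiv_mul_add_mod (q * n + j) n
  rw [hfd] at h
  have hm : PySem.Int.mod (q * n + j) n = j := by linarith
  rw [hfd, hm]

-- one iteration of A's outer loop appends exactly row i-1, i.e. pvF over its flat indices
theorem pv_block_eq (n i : Int) (hn : 0 < n) (h1 : 0 ≤ i) (h2 : i ≤ n) :
    (PySem.List.pyRange 0 i 1).map (fun _ => i) ++ PySem.List.pyRange (i + 1) (n + 1) 1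
      = (PySem.List.pyRange ((i - 1) * n) (i * n) 1).map (pvF n) := by
  rw [PySem.List.pyRange_one 0 i, PySem.List.pyRange_one (i+1) (n+1), PySem.List.pyRange_one ((i-1)*n) (i*n)]
  rw [List.map_map, List.map_map]
  have e1 : i * n - (i - 1) * n = n := by ring
  rw [e1]
  apply List.ext_getElem
  · simp; omega
  intro k h1' h2'
  simp only [List.length_map, List.length_range] at h2'
  simp only [List.length_append, List.length_map, List.length_range] at h1'
  rw [List.getElem_append]
  have hiN : i.toNat ≤ n.toNat := by omega
  split
  · rename_i hk
    simp only [List.getElem_map, List.getElem_range, Function.comp] at hk ⊢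
    rw [pvF_cell n (i-1) k hn (by positivity) (by simp only [List.length_map, List.length_range] at hk; omega)]
    simp only [List.length_map, List.length_range] at hk
    have : (i - 1) ⊔ (k : Int) = i - 1 := by
      apply max_eq_left; omega
    rw [this]; ring
  · rename_i hk
    simp only [List.getElem_map, List.getElem_range, Function.comp, List.length_map, List.length_range] at hk ⊢
    rw [pvF_cell n (i-1) k hn (by positivity) (by omega)]
    have : (i - 1) ⊔ (k : Int) = k := by apply max_eq_right; omega
    rw [this]
    omega

-- an iteration past the last real row (i ≥ n+1): the first n appended values still agree
-- with pvF over the row's flat indices; the rest is surplus never reached by the slice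
theorem pv_tail_block (n i : Int) (hn : 0 < n) (hi : n + 1 ≤ i) :
    (PySem.List.pyRange 0 i 1).map (fun _ => i) ++ PySem.List.pyRange (i + 1) (n + 1) 1
      = (PySem.List.pyRange ((i - 1) * n) ((i - 1) * n + n) 1).map (pvF n)
          ++ (PySem.List.pyRange 0 (i - n) 1).map (fun _ => i) := by
  have hemp : PySem.List.pyRange (i + 1) (n + 1) 1 = [] := by
    rw [PySem.List.pyRange_one]; simp; omega
  rw [hemp, List.append_nil]
  rw [PySem.List.pyRange_one_append 0 n i (by omega) (by omega), List.map_append]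
  congr 1
  · rw [PySem.List.pyRange_one 0 n, PySem.List.pyRange_one ((i-1)*n) ((i-1)*n+n)]
    have e1 : (i - 1) * n + n - (i - 1) * n = n := by ring
    rw [e1, List.map_map, List.map_map]
    apply List.ext_getElem
    · simp
    intro k h1' h2'
    simp only [List.length_map, List.length_range] at h1'
    simp only [List.getElem_map, List.getElem_range, Function.comp]
    rw [pvF_cell n (i-1) k hn (by positivity) (by omega)]
    have : (i - 1) ⊔ (k : Int) = i - 1 := by apply max_eq_left; omega
    rw [this]; ring
  · rw [PySem.List.pyRange_one n i, PySem.List.pyRange_one 0 (i-n)]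
    rw [List.map_map, List.map_map]
    have e2 : i - n - 0 = i - n := by ring
    rw [e2]
    apply List.ext_getElem <;> simp

-- concatenating the rows a-1..b-2 (all real rows, row -1 included) gives pvF over the flat range
theorem pv_flat_eq (n : Int) (hn : 0 < n) :
    ∀ (m : Nat) (a b : Int), (b - a).toNat = m → 0 ≤ a → b ≤ n + 1 →
    List.flatMap (fun i => (PySem.List.pyRange 0 i 1).map (fun _ => i) ++ PySem.List.pyRange (i + 1) (n + 1) 1)
        (PySem.List.pyRange a b 1)
      = (PySem.List.pyRange ((a - 1) * n) ((b - 1) * n) 1).map (pvF n) := by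
  intro m
  induction m with
  | zero =>
    intro a b hm ha hb
    have hba : b ≤ a := by omega
    have h1 : PySem.List.pyRange a b 1 = [] := by
      rw [PySem.List.pyRange_one]; simp; omega
    have h2 : PySem.List.pyRange ((a - 1) * n) ((b - 1) * n) 1 = [] := by
      rw [PySem.List.pyRange_one]; simp
      nlinarith
    rw [h1, h2]; simp
  | succ m ih =>
    intro a b hm ha hb
    have hab : a < b := by omega
    rw [PySem.List.pyRange_one_cons hab, List.flatMap_cons]
    rw [pv_block_eq n a hn ha (by omega)]
    rw [ih (a + 1) b (by omega) (by omega) hb]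
    have hsplit : PySem.List.pyRange ((a - 1) * n) ((b - 1) * n) 1
        = PySem.List.pyRange ((a - 1) * n) (a * n) 1 ++ PySem.List.pyRange ((a + 1 - 1) * n) ((b - 1) * n) 1 := by
      have e : (a + 1 - 1) * n = a * n := by ring
      rw [e]
      exact PySem.List.pyRange_one_append _ _ _ (by nlinarith) (by nlinarith)
    rw [hsplit, List.map_append]

-- slicing pvF over a flat prefix (plus any surplus the slice never reaches) yields
-- exactly B's closed form over [l, r+1)
theorem pv_slice_eq (n q l r E : Int) (M2 : List Int) (_hn : 0 < n)
    (hql : q * n ≤ l) (_hlq : l < (q + 1) * n) (hlr : l ≤ r) (hrE : r < E) :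
    PySem.List.slice ((PySem.List.pyRange (q * n) E 1).map (pvF n) ++ M2)
        (some (l - q * n)) (some (r - q * n + 1))
      = (PySem.List.pyRange l (r + 1) 1).map
          (fun k => max (PySem.Int.floordiv k n) (PySem.Int.mod k n) + 1) := by
  rw [PySem.List.slice_toNat _ (by omega) (by omega)]
  rw [PySem.List.pyRange_one (q*n) E, PySem.List.pyRange_one l (r+1), List.map_map, List.map_map]
  apply List.ext_getElem
  · simp only [List.length_take, List.length_drop, List.length_append, List.length_map, List.length_range]
    omega
  intro k hk1 hk2
  simp only [List.length_take, List.length_drop, List.length_append, List.length_map, List.length_range] at hk1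
  simp only [List.getElem_take, List.getElem_drop, List.getElem_map, List.getElem_range, Function.comp]
  rw [List.getElem_append]
  split
  · simp only [List.getElem_map, List.getElem_range, Function.comp]
    have harg : q * n + ((l - q * n).toNat + k : Nat) = l + (k : Int) := by
      push_cast; omega
    rw [harg]; rfl
  · rename_i hk
    exfalso
    simp only [List.length_map, List.length_range] at hk
    omega

-- ===== VERDICT (by name: the statement is the Claim_ definition above) =====
theorem solution_spec : Claim_equal_solution := by
  intro n l r _ hpre
  obtain ⟨hn, hcase⟩ := hpre
  unfold Spec_solution solution solution_alt
  simp only []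
  set q := PySem.Int.floordiv l n with hq
  set p := PySem.Int.floordiv r n with hp
  have hnpos : (0:Int) < n := hn
  have hqb : q * n ≤ l ∧ l < (q+1)*n := (PySem.Int.floordiv_eq_iff_of_pos hnpos).mp hq.symm
  have hpb : p * n ≤ r ∧ r < (p+1)*n := (PySem.Int.floordiv_eq_iff_of_pos hnpos).mp hp.symm
  have hmod : PySem.Int.mod l n = l - q * n := by
    have h := PySem.Int.floordiv_mul_add_mod l n
    rw [← hq] at h; linarith
  rw [hmod]
  have hbody : (fun (acc : List Int) (i : Int) =>
      List.foldl (fun x j => x ++ [j]) (List.foldl (fun x _ => x ++ [i]) acc (PySem.List.pyRange 0 i 1)) (PySem.List.pyRange (i + 1) (n + 1) 1))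
      = fun acc i => acc ++ ((PySem.List.pyRange 0 i 1).map (fun _ => i) ++ PySem.List.pyRange (i + 1) (n + 1) 1) := by
    funext acc i
    rw [PySem.List.foldl_append_singleton_eq_map (fun _ => i) _ acc]
    rw [show (fun (x : List Int) (j : Int) => x ++ [j]) = fun x j => x ++ [id j] from rfl]
    rw [PySem.List.foldl_append_singleton_eq_map id]
    simp [List.append_assoc]
  rw [hbody, PySem.List.foldl_append_eq_flatMap, List.nil_append]
  by_cases hrl : r < l
  · -- empty request: both sides are []
    have hpq : p ≤ q := by
      by_contra hc
      push Not at hc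
      nlinarith [hqb.2, hpb.1]
    have hBempty : PySem.List.pyRange l (r + 1) 1 = [] := by
      rw [PySem.List.pyRange_one]; simp; omega
    rw [hBempty, List.map_nil]
    rcases lt_or_eq_of_le hpq with hlt | heq
    · -- no rows are generated at all
      have hnil : PySem.List.pyRange (q + 1) (p + 1 + 1) 1 = [] := by
        rw [PySem.List.pyRange_one]; simp; omega
      rw [hnil, List.flatMap_nil]
      simp [PySem.List.slice]
    · -- one row is generated but the slice is empty (stop ≤ start)
      have hs0 : (0:Int) ≤ l - q * n := by linarith [hqb.1]
      have ht0 : (0:Int) ≤ r - q * n + 1 := by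
        have h := hpb.1; rw [heq] at h; linarith
      rw [PySem.List.slice_toNat _ hs0 ht0]
      have : (r - q * n + 1).toNat - (l - q * n).toNat = 0 := by omega
      rw [this, List.take_zero]
  · -- nonempty request answered from rows of the array
    have hlr : l ≤ r := by omega
    obtain ⟨hln, harm⟩ : -n ≤ l ∧ (r < n * n + n ∨ q = p) := by
      rcases hcase with h | h
      · omega
      · exact h
    have hq1 : (-1:Int) ≤ q := by nlinarith [hqb.2]
    have hqp : q ≤ p := by
      by_contra hc
      push Not at hc
      nlinarith [hqb.1, hpb.2]
    by_cases hpn : p ≤ n - 1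
    · -- all touched rows are real rows of the array
      rw [pv_flat_eq n hnpos (p + 1 + 1 - (q + 1)).toNat (q + 1) (p + 1 + 1) rfl (by omega) (by omega)]
      have e1 : (q + 1 - 1) * n = q * n := by ring
      have e2 : (p + 1 + 1 - 1) * n = (p + 1) * n := by ring
      rw [e1, e2]
      rw [← List.append_nil ((PySem.List.pyRange (q * n) ((p + 1) * n) 1).map (pvF n))]
      exact pv_slice_eq n q l r ((p + 1) * n) [] hnpos hqb.1 hqb.2 hlr hpb.2
    · push Not at hpn
      by_cases hqn : q ≤ n - 1
      · -- the last touched row is row n: only its first right%n+1 cells are taken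
        have hpn' : p = n := by
          rcases harm with hr2 | heq
          · nlinarith [hpb.1]
          · omega
        rw [hpn']
        have hsp : PySem.List.pyRange (q + 1) (n + 1 + 1) 1
            = PySem.List.pyRange (q + 1) (n + 1) 1 ++ PySem.List.pyRange (n + 1) (n + 1 + 1) 1 :=
          PySem.List.pyRange_one_append _ _ _ (by omega) (by omega)
        have hone : PySem.List.pyRange (n + 1) (n + 1 + 1) 1 = [n + 1] := by
          rw [PySem.List.pyRange_one_cons (by omega), PySem.List.pyRange_one]
          simp
        rw [hsp, List.flatMap_append, hone, List.flatMap_cons, List.flatMap_nil, List.append_nil]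
        rw [pv_flat_eq n hnpos (n + 1 - (q + 1)).toNat (q + 1) (n + 1) rfl (by omega) (by omega)]
        rw [pv_tail_block n (n + 1) hnpos (by omega)]
        have e1 : (q + 1 - 1) * n = q * n := by ring
        have e2 : (n + 1 - 1) * n = n * n := by ring
        rw [e1, e2]
        rw [← List.append_assoc]
        rw [← List.map_append, ← PySem.List.pyRange_one_append (q * n) (n * n) (n * n + n) (by nlinarith) (by omega)]
        exact pv_slice_eq n q l r (n * n + n) _ hnpos hqb.1 hqb.2 hlr
          (by have h := hpb.2; rw [hpn'] at h; nlinarith)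
      · -- a single generated row past the array: only its first right%n+1 cells are taken
        push Not at hqn
        have heq : q = p := by
          rcases harm with hr2 | heq
          · have hpn2 : p ≤ n := by nlinarith [hpb.1]
            omega
          · exact heq
        rw [← heq]
        have hone : PySem.List.pyRange (q + 1) (q + 1 + 1) 1 = [q + 1] := by
          rw [PySem.List.pyRange_one_cons (by omega), PySem.List.pyRange_one]
          simp
        rw [hone, List.flatMap_cons, List.flatMap_nil, List.append_nil]
        rw [pv_tail_block n (q + 1) hnpos (by omega)]
        have e1 : (q + 1 - 1) * n = q * n := by ring
        rw [e1]
        exact pv_slice_eq n q l r (q * n + n) _ hnpos hqb.1 hqb.2 hlr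
          (by have h := hpb.2; rw [← heq] at h; nlinarith)
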